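-- pv_equiv track=rewrite | github.com/pypi-data/pypi-mirror-389 | packages/ariadne-router/ariadne_router-0.4.5.tar.gz/ariadne_router-0.4.5/benchmarks/run_all_benchmarks.py | _group_by_circuit
-- ===== SOURCE A (Python) =====
-- from collections.abc import Callable, Iterable
--
-- def _group_by_circuit(
--     entries: Iterable[dict[str, object]], circuit_key: str = "circuit"
-- ) -> dict[str, list[dict[str, object]]]:
--     grouped: dict[str, list[dict[str, object]]] = {}
--     for entry in entries:
--         circuit_name = str(entry.get(circuit_key, "unknown"))
--         grouped.setdefault(circuit_name, []).append(entry)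
--     return grouped
-- ===== SOURCE B (Python) =====
-- def _group_by_circuit(entries, circuit_key="circuit"):
--     def key(e):
--         return str(e.get(circuit_key, "unknown"))
--     keys = list(dict.fromkeys(key(e) for e in entries))
--     return {k: [e for e in entries if key(e) == k] for k in keys}
-- ===== Notes on version B (the rewrite author's own statement) =====
-- stated objective: alternative
-- what changed: Replaces the single-pass setdefault accumulation with a two-pass decomposition: first collect the distinct circuit names in first-appearance order (dict.fromkeys), then build each group by filtering the entry list per key.
import Mathlib
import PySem

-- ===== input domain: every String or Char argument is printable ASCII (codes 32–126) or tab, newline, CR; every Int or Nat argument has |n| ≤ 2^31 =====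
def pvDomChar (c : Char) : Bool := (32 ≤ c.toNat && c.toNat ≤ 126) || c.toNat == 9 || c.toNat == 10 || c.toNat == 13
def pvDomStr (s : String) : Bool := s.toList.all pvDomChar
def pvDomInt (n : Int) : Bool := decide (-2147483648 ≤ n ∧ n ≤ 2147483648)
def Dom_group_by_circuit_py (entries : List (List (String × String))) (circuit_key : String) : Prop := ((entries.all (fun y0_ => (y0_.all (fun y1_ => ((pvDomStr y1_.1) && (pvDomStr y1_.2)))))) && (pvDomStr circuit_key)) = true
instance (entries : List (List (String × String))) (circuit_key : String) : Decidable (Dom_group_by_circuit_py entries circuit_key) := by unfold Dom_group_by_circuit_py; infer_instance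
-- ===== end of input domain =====

-- ===== PORT A =====
-- A: one pass, grouped.setdefault(name, []).append(entry)  (modify k [] (· ++ [e])).
def group_by_circuit_py (entries : List (List (String × String))) (circuit_key : String) : List (String × List (List (String × String))) :=
  (entries.foldl
    (fun grouped entry =>
      grouped.modify ((PySem.Dict.mk entry).getD circuit_key "unknown") [] (· ++ [entry]))
    PySem.Dict.empty).items

-- ===== PORT B =====
-- B: two passes — distinct keys in first-appearance order, then a filter per key.
def group_by_circuit_py_alt (entries : List (List (String × String))) (circuit_key : String) : List (String × List (List (String × String))) :=
  (PySem.List.dedup (entries.map (fun e => (PySem.Dict.mk e).getD circuit_key "unknown"))).map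
    (fun k => (k, entries.filter (fun e => (PySem.Dict.mk e).getD circuit_key "unknown" == k)))

-- ===== PRECONDITION & SPEC =====
def Spec_group_by_circuit_py (entries : List (List (String × String))) (circuit_key : String) (out : List (String × List (List (String × String)))) : Prop := out = group_by_circuit_py_alt entries circuit_key
instance (entries : List (List (String × String))) (circuit_key : String) (out : List (String × List (List (String × String)))) : Decidable (Spec_group_by_circuit_py entries circuit_key out) := by unfold Spec_group_by_circuit_py; infer_instance

-- ===== CLAIM =====
def Claim_equal_group_by_circuit_py : Prop := ∀ (entries : List (List (String × String))) (circuit_key : String), Dom_group_by_circuit_py entries circuit_key → Spec_group_by_circuit_py entries circuit_key (group_by_circuit_py entries circuit_key)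

-- ===== LEMMAS AND PROOFS =====
theorem grouping_fold_eq (key : List (String × String) → String)
    (entries : List (List (String × String))) :
    (entries.foldl (fun g e => g.modify (key e) [] (· ++ [e])) PySem.Dict.empty).items
      = (PySem.List.dedup (entries.map key)).map
          (fun k => (k, entries.filter (fun e => key e == k))) := by
  have hnd : (entries.foldl (fun g e => g.modify (key e) [] (· ++ [e]))
      PySem.Dict.empty).keys.Nodup :=
    PySem.Dict.nodup_keys_foldl_modify_key entries key []
      (fun _ e => (· ++ [e])) PySem.Dict.empty PySem.Dict.nodup_keys_empty
  rw [PySem.Dict.items_eq_map_keys _ hnd [],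
      PySem.Dict.keys_foldl_modify_key]
  have hgetD : ∀ k, (entries.foldl (fun g e => g.modify (key e) [] (· ++ [e]))
      PySem.Dict.empty).getD k [] = entries.filter (fun e => key e == k) := by
    intro k
    have hfold : entries.foldl (fun g e => g.modify (key e) [] (· ++ [e])) PySem.Dict.empty
        = (entries.map (fun e => (key e, e))).foldl
            (fun d p => d.modify p.1 [] (· ++ [p.2])) PySem.Dict.empty := by
      rw [List.foldl_map]
    rw [hfold, PySem.Dict.getD_foldl_modify_append]
    simp [List.filter_map, Function.comp_def]
  simp [PySem.Dict.keys_empty, hgetD, PySem.Set.update, PySem.List.dedup_eq_ofList,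
    PySem.Set.ofList]

-- ===== VERDICT =====
theorem group_by_circuit_py_spec : Claim_equal_group_by_circuit_py := by
  intro entries circuit_key _
  unfold Spec_group_by_circuit_py group_by_circuit_py group_by_circuit_py_alt
  exact grouping_fold_eq (fun e => (PySem.Dict.mk e).getD circuit_key "unknown") entries
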